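-- pv_equiv track=rewrite | github.com/jdruffin/HackerRank | python/threeMonthPrepKit/gamingArray1.py | gamingArray
-- ===== SOURCE A (Python) =====
-- def gamingArray(arr):
--     # Write your code here
--     hashmap = {}
--     for index, value in enumerate(arr):
--         hashmap.update({value: index})
--
--     arr.sort(reverse = True)
--
--     currentIndex = len(arr)-1
--     turns = 0
--     for value in arr:
--         if hashmap[value] <= currentIndex:
--             currentIndex = hashmap[value]
--             turns += 1
--         if currentIndex == 0:
--             return 'ANDY' if turns % 2 == 0 else 'BOB'
-- ===== SOURCE B (Python) =====
-- def gamingArray(arr):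
--     # One forward pass counting prefix maxima (no sort, no hashmap).
--     # Does not mutate arr (A sorts it in place); equivalence is about the return value.
--     if not arr:
--         return None
--     count = 0
--     best = None
--     for v in arr:
--         if best is None or v > best:
--             best = v
--             count += 1
--     return 'BOB' if count % 2 else 'ANDY'
-- ===== Notes on version B (the rewrite author's own statement) =====
-- stated objective: alternative
-- what changed: B replaces A's hashmap + reverse sort + indexed walk by a single forward pass over arr that counts prefix maxima and returns the parity (O(n) work instead of a sort; a timing run could not credit speed because its large inputs have duplicates, outside Pre_); B also does not mutate arr (A sorts it in place). Pre_ excludes lists with duplicate values, on which A's last-occurrence hashmap makes termination and the turn count accidental (A can return None there).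
-- outside the precondition, e.g. on gamingArray([2, 2]): A returns None, B returns 'BOB'
import Mathlib
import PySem

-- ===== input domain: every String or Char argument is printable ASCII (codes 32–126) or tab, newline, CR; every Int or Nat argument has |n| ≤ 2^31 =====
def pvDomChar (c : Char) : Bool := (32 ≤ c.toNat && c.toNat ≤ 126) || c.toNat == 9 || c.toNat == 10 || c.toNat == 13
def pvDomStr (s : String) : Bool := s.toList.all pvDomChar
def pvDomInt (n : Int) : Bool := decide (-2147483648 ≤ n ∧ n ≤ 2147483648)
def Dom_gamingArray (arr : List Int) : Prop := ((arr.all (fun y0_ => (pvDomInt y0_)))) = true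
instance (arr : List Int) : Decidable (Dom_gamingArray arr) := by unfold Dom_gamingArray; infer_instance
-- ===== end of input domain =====

-- B is a single forward pass counting prefix maxima (no sort, no hashmap); A sorts arr in place,
-- the equivalence is about the return value only.

-- ===== PORT A =====
-- hashmap = {}; for index, value in enumerate(arr): hashmap.update({value: index})
def pvDict (arr : List Int) : PySem.Dict Int Int :=
  (PySem.List.enumerate arr).foldl (fun d p => d.insert p.2 p.1) PySem.Dict.empty

-- for value in arr(sorted desc): if hashmap[value] <= currentIndex: …; if currentIndex == 0: return …
def gamingArrayLoop (d : PySem.Dict Int Int) : List Int → Int → Int → Option String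
  | [], _, _ => none
  | v :: rest, currentIndex, turns =>
    match d.get? v with
    | none => none  -- KeyError (unreachable: every value of arr is a key)
    | some i =>
      let currentIndex' := if i ≤ currentIndex then i else currentIndex
      let turns' := if i ≤ currentIndex then turns + 1 else turns
      if currentIndex' = 0 then some (if turns' % 2 = 0 then "ANDY" else "BOB")
      else gamingArrayLoop d rest currentIndex' turns'

def gamingArray (arr : List Int) : Option String :=
  let hashmap := pvDict arr
  let sortedArr := PySem.List.sorted arr (fun x => x) true
  gamingArrayLoop hashmap sortedArr ((arr.length : Int) - 1) 0

-- ===== PORT B =====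
def gamingArray_alt (arr : List Int) : Option String :=
  match arr with
  | [] => none
  | _ :: _ =>
    let st := arr.foldl (fun (st : Option Int × Int) v =>
      match st.1 with
      | none => (some v, st.2 + 1)
      | some b => if v > b then (some v, st.2 + 1) else st) (none, 0)
    some (if st.2 % 2 ≠ 0 then "BOB" else "ANDY")

-- ===== PRECONDITION & SPEC =====
-- Pre_ excludes lists with duplicate values, on which A's last-occurrence hashmap makes
-- termination and the turn count accidental (A can return None there, e.g. on [2, 2]).
def Pre_gamingArray (arr : List Int) : Prop := arr.Nodup
instance (arr : List Int) : Decidable (Pre_gamingArray arr) := by unfold Pre_gamingArray; infer_instance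
def pvWitness_gamingArray : List Int := [5, 2, 9, 1]

def Spec_gamingArray (arr : List Int) (out : Option String) : Prop := out = gamingArray_alt arr
instance (arr : List Int) (out : Option String) : Decidable (Spec_gamingArray arr out) := by unfold Spec_gamingArray; infer_instance

-- ===== CLAIM (what is proved, stated in full; the proofs are below) =====
def Claim_equal_gamingArray : Prop := ∀ (arr : List Int), Dom_gamingArray arr → Pre_gamingArray arr → Spec_gamingArray arr (gamingArray arr)

-- ===== LEMMAS AND PROOFS =====

-- the prefix-maxima counter, in recursive form (proof helper mirroring B's fold)
def pvGt (v : Int) : Option Int → Bool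
  | none => true
  | some m => decide (m < v)

def pvCnt : Option Int → List Int → Int
  | _, [] => 0
  | b, v :: r => if pvGt v b then 1 + pvCnt (some v) r else pvCnt b r

def pvBest : Option Int → List Int → Option Int
  | b, [] => b
  | b, v :: r => pvBest (if pvGt v b then some v else b) r

theorem pvFold_eq (l : List Int) : ∀ (b : Option Int) (c : Int),
    l.foldl (fun (st : Option Int × Int) v =>
      match st.1 with
      | none => (some v, st.2 + 1)
      | some m => if v > m then (some v, st.2 + 1) else st) (b, c)
    = (pvBest b l, c + pvCnt b l) := by
  induction l with
  | nil => intro b c; simp [pvBest, pvCnt]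
  | cons v r ih =>
    intro b c
    cases b with
    | none => simp [List.foldl_cons, ih, pvBest, pvCnt, pvGt]; ring
    | some m =>
      by_cases h : m < v
      · simp [List.foldl_cons, h, ih, pvBest, pvCnt, pvGt]; ring
      · have h' : ¬ (v > m) := h
        simp [List.foldl_cons, h', ih, pvBest, pvCnt, pvGt]

theorem pvCnt_append (y : List Int) : ∀ (x : List Int) (b : Option Int),
    pvCnt b (x ++ y) = pvCnt b x + pvCnt (pvBest b x) y := by
  intro x
  induction x with
  | nil => intro b; simp [pvCnt, pvBest]
  | cons v r ih =>
    intro b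
    by_cases h : pvGt v b
    · simp [pvCnt, pvBest, h, ih]; ring
    · simp [pvCnt, pvBest, h, ih]

theorem pvBest_mem : ∀ (x : List Int) (b : Option Int),
    pvBest b x = b ∨ ∃ v ∈ x, pvBest b x = some v := by
  intro x
  induction x with
  | nil => intro b; left; rfl
  | cons v r ih =>
    intro b
    by_cases h : pvGt v b
    · rcases ih (some v) with h1 | ⟨w, hw, hbw⟩
      · right; exact ⟨v, by simp, by simp [pvBest, h, h1]⟩
      · right; exact ⟨w, by simp [hw], by simp [pvBest, h, hbw]⟩
    · rcases ih b with h1 | ⟨w, hw, hbw⟩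
      · left; simp [pvBest, h, h1]
      · right; exact ⟨w, by simp [hw], by simp [pvBest, h, hbw]⟩

theorem pvCnt_zero (b : Option Int) : ∀ (l : List Int), (∀ v ∈ l, pvGt v b = false) → pvCnt b l = 0 := by
  intro l
  induction l with
  | nil => intro _; rfl
  | cons v r ih =>
    intro h
    have hv : pvGt v b = false := h v (by simp)
    simp [pvCnt, hv, ih (fun w hw => h w (by simp [hw]))]

-- the max of a duplicate-free list contributes exactly one more prefix maximum
theorem pvCnt_of_max (p : List Int) (hn : p.Nodup) (i : Nat) (hi : i < p.length)
    (hmax : ∀ x ∈ p, x ≤ p[i]) :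
    pvCnt none p = pvCnt none (p.take i) + 1 := by
  have hdecomp : p = p.take i ++ p[i] :: p.drop (i + 1) := by
    conv_lhs => rw [← List.take_append_drop i p]
    rw [List.drop_eq_getElem_cons hi]
  have hmid : p[i] ∉ p.take i ++ p.drop (i + 1) ∧ (p.take i ++ p.drop (i + 1)).Nodup := by
    have h0 : (p.take i ++ p[i] :: p.drop (i + 1)).Nodup := by rw [← hdecomp]; exact hn
    have h1 := List.nodup_middle.mp h0
    simpa [List.nodup_cons] using h1
  have hne : ∀ x ∈ p.take i ++ p.drop (i + 1), x < p[i] := by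
    intro x hx
    have hxp : x ∈ p := by
      rcases List.mem_append.mp hx with h | h
      · exact List.mem_of_mem_take h
      · exact List.mem_of_mem_drop h
    exact lt_of_le_of_ne (hmax x hxp) (fun he => hmid.1 (he ▸ hx))
  have hgt : pvGt p[i] (pvBest none (p.take i)) = true := by
    rcases pvBest_mem (p.take i) none with h | ⟨v, hv, hbv⟩
    · simp [h, pvGt]
    · have : v < p[i] := hne v (List.mem_append.mpr (Or.inl hv))
      simp [hbv, pvGt, this]
  have hz : pvCnt (some p[i]) (p.drop (i + 1)) = 0 := by
    apply pvCnt_zero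
    intro v hv
    have : v < p[i] := hne v (List.mem_append.mpr (Or.inr hv))
    simp [pvGt]; omega
  calc pvCnt none p = pvCnt none (p.take i ++ p[i] :: p.drop (i + 1)) := by rw [← hdecomp]
    _ = pvCnt none (p.take i) + pvCnt (pvBest none (p.take i)) (p[i] :: p.drop (i + 1)) := pvCnt_append _ _ _
    _ = pvCnt none (p.take i) + 1 := by simp [pvCnt, hgt, hz]

-- the hashmap maps each value of a duplicate-free list to its index
theorem pvDict_get (arr : List Int) (hn : arr.Nodup) (k : Nat) (hk : k < arr.length) :
    (pvDict arr).get? arr[k] = some (k : Int) := by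
  have hfresh : ∀ a ∈ PySem.List.enumerate arr, (PySem.Dict.empty : PySem.Dict Int Int).contains a.2 = false := by
    intro a _; simp [PySem.Dict.contains_empty]
  have hmapnd : ((PySem.List.enumerate arr).map (·.2)).Nodup := by
    rw [PySem.List.map_snd_enumerate]; exact hn
  have hitems : (pvDict arr).items
      = (PySem.Dict.empty : PySem.Dict Int Int).items ++ (PySem.List.enumerate arr).map (fun a => (a.2, a.1)) := by
    exact PySem.Dict.items_foldl_insert_fresh (PySem.List.enumerate arr) (·.2) (·.1) _ hfresh hmapnd
  have hmem : ((arr[k] : Int), (k : Int)) ∈ (pvDict arr).items := by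
    rw [hitems]
    apply List.mem_append.mpr; right
    apply List.mem_map.mpr
    refine ⟨((k : Int), arr[k]), ?_, rfl⟩
    exact (PySem.List.mem_enumerate_iff _ _ _).mpr ⟨k, hk, by simp⟩
  have hkeys : (pvDict arr).keys.Nodup := by
    have : (pvDict arr).keys = (PySem.List.enumerate arr).map (·.2) := by
      simp only [PySem.Dict.keys, hitems]
      simp [PySem.Dict.empty, List.map_map, Function.comp_def]
    rw [this]; exact hmapnd
  exact PySem.Dict.get?_of_mem_items _ hmem hkeys

-- main invariant of A's walk over the descending-sorted list:
-- s holds (as a strictly descending rearrangement) the prefix arr.take m plus junk whose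
-- indices all exceed currentIndex; the loop returns the parity of turns + #prefix-maxima.
theorem pvLoop_main (arr : List Int) (hn : arr.Nodup) :
    ∀ (s J : List Int) (m : Nat) (ci t : Int),
    1 ≤ m → m ≤ arr.length →
    (m : Int) ≤ ci + 1 → 1 ≤ ci →
    s.Pairwise (fun a b => b < a) →
    s.Perm (arr.take m ++ J) →
    (∀ j ∈ J, ∃ (k : Nat) (_ : k < arr.length), arr[k] = j ∧ ci < (k : Int)) →
    gamingArrayLoop (pvDict arr) s ci t
      = some (if (t + pvCnt none (arr.take m)) % 2 = 0 then "ANDY" else "BOB") := by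
  intro s
  induction s with
  | nil =>
    intro J m ci t hm1 hmlen _ _ _ hperm _
    exfalso
    have := hperm.length_eq
    simp [List.length_take] at this
    omega
  | cons h s' ih =>
    intro J m ci t hm1 hmlen hmci hci1 hpw hperm hJ
    have hhd : ∀ b ∈ s', b < h := (List.pairwise_cons.mp hpw).1
    have hpw' : s'.Pairwise (fun a b => b < a) := (List.pairwise_cons.mp hpw).2
    have hhmem : h ∈ arr.take m ++ J := hperm.mem_iff.mp (by simp)
    rcases List.mem_append.mp hhmem with hpre | hjunk
    · -- h is the maximum of the prefix arr.take m
      obtain ⟨i, hilt, hig⟩ := List.getElem_of_mem hpre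
      have hlmin : i < min m arr.length := by simpa [List.length_take] using hilt
      have hilen : i < arr.length := by omega
      have him : i < m := by omega
      have harr_i : arr[i] = h := by rw [← hig]; simp [List.getElem_take]
      have hget : (pvDict arr).get? h = some (i : Int) := by rw [← harr_i]; exact pvDict_get arr hn i hilen
      have hle : (i : Int) ≤ ci := by omega
      have hmax : ∀ x ∈ arr.take m, x ≤ h := by
        intro x hx
        have hxs : x ∈ h :: s' := hperm.mem_iff.mpr (List.mem_append.mpr (Or.inl hx))
        rcases List.mem_cons.mp hxs with rfl | hx' 
        · exact le_refl _
        · exact le_of_lt (hhd x hx')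
      have hcnt : pvCnt none (arr.take m) = pvCnt none (arr.take i) + 1 := by
        have h1 : ((arr.take m)[i]'(hilt)) = h := hig
        have h2 : (arr.take m).take i = arr.take i := by rw [List.take_take]; congr 1; omega
        have := pvCnt_of_max (arr.take m) (hn.sublist (List.take_sublist m arr)) i hilt
          (by intro x hx; rw [h1]; exact hmax x hx)
        rw [h2] at this; exact this
      by_cases hi0 : (i : Int) = 0
      · -- the prefix maximum sits at index 0: return
        have hi0' : i = 0 := by exact_mod_cast hi0
        rw [gamingArrayLoop, hget]
        simp only [hle, if_pos]
        rw [if_pos hi0, hcnt, hi0']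
        simp [pvCnt]
      · -- recurse on the shorter prefix arr.take i
        have hi1 : 1 ≤ (i : Int) := by omega
        rw [gamingArrayLoop, hget]
        simp only [hle, if_pos]
        rw [if_neg hi0]
        have hmid : arr.take m = arr.take i ++ h :: (arr.take m).drop (i + 1) := by
          conv_lhs => rw [← List.take_append_drop i (arr.take m)]
          rw [List.drop_eq_getElem_cons hilt, hig, List.take_take]
          congr 2
          omega
        have hperm' : s'.Perm (arr.take i ++ ((arr.take m).drop (i + 1) ++ J)) := by
          have h1 : (arr.take m ++ J).Perm (h :: (arr.take i ++ ((arr.take m).drop (i + 1) ++ J))) := by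
            have h2 : ((arr.take i ++ h :: (arr.take m).drop (i + 1)) ++ J).Perm
                (h :: (arr.take i ++ ((arr.take m).drop (i + 1) ++ J))) := by
              have h3 := List.perm_middle (a := h) (l₁ := arr.take i)
                (l₂ := (arr.take m).drop (i + 1) ++ J)
              rw [List.append_assoc, List.cons_append]
              exact h3
            exact (by rw [← hmid] at h2; exact h2)
          exact (hperm.trans h1).cons_inv
        have hJ' : ∀ j ∈ (arr.take m).drop (i + 1) ++ J,
            ∃ (k : Nat) (_ : k < arr.length), arr[k] = j ∧ (i : Int) < (k : Int) := by
          intro j hj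
          rcases List.mem_append.mp hj with hj1 | hj2
          · obtain ⟨l, hllt, hlg⟩ := List.getElem_of_mem hj1
            have hlm : i + 1 + l < m := by
              have := hllt
              simp [List.length_drop, List.length_take] at this
              omega
            refine ⟨i + 1 + l, by omega, ?_, by push_cast; omega⟩
            rw [← hlg]
            simp [List.getElem_drop, List.getElem_take]
          · obtain ⟨k, hk, he, hcik⟩ := hJ j hj2
            exact ⟨k, hk, he, by omega⟩
        have := ih ((arr.take m).drop (i + 1) ++ J) i (i : Int) (t + 1)
          (by omega) (by omega) (by omega) hi1 hpw' hperm' hJ'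
        rw [this, hcnt]
        have : (t + 1 + pvCnt none (arr.take i)) = (t + (pvCnt none (arr.take i) + 1)) := by ring
        rw [this]
    · -- h is junk: its index exceeds currentIndex, the step is a no-op
      obtain ⟨k, hk, he, hcik⟩ := hJ h hjunk
      have hget : (pvDict arr).get? h = some (k : Int) := by rw [← he]; exact pvDict_get arr hn k hk
      rw [gamingArrayLoop, hget]
      have hnle : ¬ ((k : Int) ≤ ci) := by omega
      simp only [hnle, if_false]
      rw [if_neg (by omega)]
      have hperm' : s'.Perm (arr.take m ++ J.erase h) := by
        have h1 : J.Perm (h :: J.erase h) := List.perm_cons_erase hjunk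
        have h2 : (arr.take m ++ J).Perm (h :: (arr.take m ++ J.erase h)) :=
          (List.Perm.append_left _ h1).trans List.perm_middle
        exact (hperm.trans h2).cons_inv
      exact ih (J.erase h) m ci t hm1 hmlen hmci hci1 hpw' hperm'
        (fun j hj => hJ j (List.mem_of_mem_erase hj))

-- ===== VERDICT (by name: the statement is the Claim_ definition above) =====
theorem gamingArray_spec : Claim_equal_gamingArray := by
  intro arr _hdom hpre
  unfold Spec_gamingArray
  match arr, hpre with
  | [], _ => rfl
  | [a], _ =>
    show gamingArray [a] = gamingArray_alt [a]
    have hs : PySem.List.sorted [a] (fun x => x) true = [a] :=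
      PySem.List.sorted_rev_eq_of_perm_of_pairwise_gt [a] [a] (fun x => x) (List.Perm.refl [a]) (by simp)
    have hget : (pvDict [a]).get? a = some ((0 : Nat) : Int) :=
      pvDict_get [a] (List.nodup_singleton a) 0 (by simp)
    show gamingArrayLoop (pvDict [a]) (PySem.List.sorted [a] (fun x => x) true)
        ((([a] : List Int).length : Int) - 1) 0 = gamingArray_alt [a]
    rw [hs, gamingArrayLoop, hget]
    norm_num [gamingArray_alt]
  | a :: b :: rest, hpre =>
    show gamingArray (a :: b :: rest) = gamingArray_alt (a :: b :: rest)
    set arr := a :: b :: rest with harr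
    have hn : arr.Nodup := hpre
    -- A side via the loop invariant
    have hpw : (PySem.List.sorted arr (fun x => x) true).Pairwise (fun x y => y < x) := by
      have h1 : (PySem.List.sorted arr (fun x => x) true).Pairwise (fun x y => y ≤ x) :=
        PySem.List.sorted_pairwise_rev arr _
      have h2 : (PySem.List.sorted arr (fun x => x) true).Nodup :=
        ((PySem.List.sorted_perm arr _ _).nodup_iff).mpr hn
      exact (h1.and h2).imp (fun {x y} hxy => lt_of_le_of_ne hxy.1 (Ne.symm hxy.2))
    have hperm : (PySem.List.sorted arr (fun x => x) true).Perm (arr.take arr.length ++ []) := by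
      simpa [List.take_length] using PySem.List.sorted_perm arr (fun x => x) true
    have hlen : 2 ≤ arr.length := by rw [harr]; simp
    have hA := pvLoop_main arr hn (PySem.List.sorted arr (fun x => x) true) [] arr.length
      ((arr.length : Int) - 1) 0 (by omega) (le_refl _) (by omega) (by omega)
      hpw hperm (by intro j hj; simp at hj)
    rw [List.take_length] at hA
    -- B side via the fold characterisation
    have hB : gamingArray_alt arr
        = some (if pvCnt none arr % 2 ≠ 0 then "BOB" else "ANDY") := by
      rw [harr]
      show some (if ((a :: b :: rest).foldl (fun (st : Option Int × Int) v =>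
          match st.1 with
          | none => (some v, st.2 + 1)
          | some m => if v > m then (some v, st.2 + 1) else st)
          ((none : Option Int), (0 : Int))).2 % 2 ≠ 0 then "BOB" else "ANDY")
        = some (if pvCnt none (a :: b :: rest) % 2 ≠ 0 then "BOB" else "ANDY")
      rw [pvFold_eq]
      norm_num
    rw [show gamingArray arr = gamingArrayLoop (pvDict arr)
      (PySem.List.sorted arr (fun x => x) true) ((arr.length : Int) - 1) 0 from rfl]
    rw [hA, hB]
    by_cases hp : (0 + pvCnt none arr) % 2 = 0
    · rw [if_pos hp, if_neg (by simpa using hp)]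
    · rw [if_neg hp, if_pos (by simpa using hp)]
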